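-- pv_equiv track=rewrite | github.com/digitard/Kestrel | kestrel/parsers/nikto.py | can_parse
-- ===== SOURCE A (Python) =====
-- def can_parse(output: str) -> bool:
--     """Check if output looks like nikto output."""
--     indicators = [
--         "- Nikto",
--         "+ Target IP:",
--         "+ Target Hostname:",
--         "+ Target Port:",
--         "OSVDB-",
--     ]
--     return any(ind in output for ind in indicators)
-- ===== SOURCE B (Python) =====
-- def can_parse(output: str) -> bool:
--     """Check if output looks like nikto output."""
--     indicators = ("- Nikto", "+ Target IP:", "+ Target Hostname:", "+ Target Port:", "OSVDB-")
--     # single left-to-right scan: at each position, test whether some indicator starts there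
--     for i in range(len(output) + 1):
--         for ind in indicators:
--             if output.startswith(ind, i):
--                 return True
--     return False
-- ===== Notes on version B (the rewrite author's own statement) =====
-- stated objective: alternative
-- what changed: Replaces any(ind in output ...) (one full substring search per indicator) with a single left-to-right scan over positions that tests each indicator as a prefix at the current position.
import Mathlib
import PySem

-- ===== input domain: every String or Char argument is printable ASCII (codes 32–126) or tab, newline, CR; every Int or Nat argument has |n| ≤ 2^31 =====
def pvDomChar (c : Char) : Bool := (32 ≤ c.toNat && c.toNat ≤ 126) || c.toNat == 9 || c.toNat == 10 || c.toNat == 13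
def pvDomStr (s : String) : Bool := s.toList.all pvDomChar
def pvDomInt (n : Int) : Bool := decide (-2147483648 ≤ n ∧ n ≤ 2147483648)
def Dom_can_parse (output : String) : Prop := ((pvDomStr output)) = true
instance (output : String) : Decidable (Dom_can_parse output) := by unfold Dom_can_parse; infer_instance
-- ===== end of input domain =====

-- ===== PORT A =====
-- any(ind in output for ind in indicators): one membership ('in') test per indicator
def pvIndicators : List String :=
  ["- Nikto", "+ Target IP:", "+ Target Hostname:", "+ Target Port:", "OSVDB-"]

def can_parse (output : String) : Bool :=
  pvIndicators.any (fun ind => PySem.Str.isIn ind output)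

-- ===== PORT B =====
-- single scan over positions; at each suffix, test each indicator as a prefix
def pvIndChars : List (List Char) := pvIndicators.map String.toList

def pvScan (s : List Char) : Bool :=
  match s with
  | [] => pvIndChars.any (fun ind => ind.isPrefixOf [])
  | c :: t => pvIndChars.any (fun ind => ind.isPrefixOf (c :: t)) || pvScan t

def can_parse_alt (output : String) : Bool := pvScan output.toList

-- ===== PRECONDITION & SPEC =====
def Spec_can_parse (output : String) (out : Bool) : Prop := out = can_parse_alt output
instance (output : String) (out : Bool) : Decidable (Spec_can_parse output out) := by unfold Spec_can_parse; infer_instance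

-- ===== CLAIM (what is proved, stated in full; the proofs are below) =====
def Claim_equal_can_parse : Prop := ∀ (output : String), Dom_can_parse output → Spec_can_parse output (can_parse output)

-- ===== LEMMAS AND PROOFS =====
theorem pvScan_iff (s : List Char) :
    pvScan s = true ↔ ∃ ind ∈ pvIndChars, ind <:+: s := by
  induction s with
  | nil =>
    simp [pvScan, List.any_eq_true, List.isPrefixOf_iff_prefix,
      List.prefix_nil, List.infix_nil]
  | cons c t ih =>
    simp only [pvScan, Bool.or_eq_true, ih, List.any_eq_true,
      List.isPrefixOf_iff_prefix]
    constructor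
    · rintro (⟨ind, h1, h2⟩ | ⟨ind, h1, h2⟩)
      · exact ⟨ind, h1, h2.isInfix⟩
      · exact ⟨ind, h1, h2.trans (List.suffix_cons c t).isInfix⟩
    · rintro ⟨ind, h1, h2⟩
      rcases List.infix_cons_iff.mp h2 with h | h
      · exact Or.inl ⟨ind, h1, h⟩
      · exact Or.inr ⟨ind, h1, h⟩

-- ===== VERDICT (by name: the statement is the Claim_ definition above) =====
theorem can_parse_spec : Claim_equal_can_parse := by
  intro output _
  unfold Spec_can_parse can_parse can_parse_alt
  rw [Bool.eq_iff_iff, pvScan_iff]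
  simp only [List.any_eq_true, PySem.Str.isIn_iff_infix, pvIndChars, List.mem_map]
  constructor
  · rintro ⟨ind, h1, h2⟩; exact ⟨ind.toList, ⟨ind, h1, rfl⟩, h2⟩
  · rintro ⟨_, ⟨ind, h1, rfl⟩, h2⟩; exact ⟨ind, h1, h2⟩
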